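-- pv_equiv track=rewrite | github.com/AmberJBlue/Project-Euler-Solutions | python/101-150/130.py | leastDivisible
-- ===== SOURCE A (Python) =====
-- def leastDivisible(n):
-- 	if n % 2 == 0 or n % 5 == 0:
-- 		return 0
-- 	sum = 1
-- 	pow = 1
-- 	k = 1
-- 	while sum % n != 0:
-- 		k += 1
-- 		pow = pow * 10 % n
-- 		sum = (sum + pow) % n
-- 	return k
-- ===== SOURCE B (Python) =====
-- def leastDivisible(n):
--     # n | R(k) iff 9*|n| | 10^k - 1: search the multiplicative order of 10
--     # modulo 9*|n| by testing each exponent with built-in modular pow.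
--     if n % 2 == 0 or n % 5 == 0:
--         return 0
--     m = 9 * abs(n)
--     k = 1
--     while pow(10, k, m) != 1:
--         k += 1
--     return k
-- ===== Notes on version B (the rewrite author's own statement) =====
-- stated objective: simpler
-- what changed: B drops A's running repunit-sum accumulation mod n (state variables sum, pow, k) and instead searches the multiplicative order of ten modulo nine*|n| by testing successive exponents with built-in modular pow, using the identity that n divides the k-digit repunit iff nine*|n| divides ten^k - 1; no accumulated modular state at all.
import Mathlib
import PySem

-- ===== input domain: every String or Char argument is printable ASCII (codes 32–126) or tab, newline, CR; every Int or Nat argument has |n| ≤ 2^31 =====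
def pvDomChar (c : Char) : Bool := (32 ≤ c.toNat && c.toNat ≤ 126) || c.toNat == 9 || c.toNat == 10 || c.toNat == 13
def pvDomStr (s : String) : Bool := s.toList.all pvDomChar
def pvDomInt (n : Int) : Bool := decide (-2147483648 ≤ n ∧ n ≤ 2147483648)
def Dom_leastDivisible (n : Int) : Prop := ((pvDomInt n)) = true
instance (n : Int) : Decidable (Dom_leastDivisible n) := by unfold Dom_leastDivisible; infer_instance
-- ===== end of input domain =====

-- B replaces A's repunit-sum accumulation mod n by searching the multiplicative order of 10 modulo 9*|n| with per-step modular exponentiation (no accumulated state); objective: simpler.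


-- ===== PORT A =====
-- the while loop; fuel is only a totality guard
def leastDivisibleGo (n : Int) : Nat → Int → Int → Int → Int
  | 0, _, _, k => k
  | f + 1, sum, pow, k =>
    if PySem.Int.mod sum n ≠ 0 then
      let pow' := PySem.Int.mod (pow * 10) n
      leastDivisibleGo n f (PySem.Int.mod (sum + pow') n) pow' (k + 1)
    else k

def leastDivisible (n : Int) : Int :=
  if PySem.Int.mod n 2 = 0 ∨ PySem.Int.mod n 5 = 0 then 0
  else leastDivisibleGo n (9 * n.natAbs + 9) 1 1 1

-- ===== PORT B =====
-- Python's built-in pow(10, k, m) is ported as PySem.Int.mod (10 ^ k) m (exact for k ≥ 0, m > 0,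
-- which holds at every call site); fuel is only a totality guard
def leastDivisibleAltSearch (m : Int) : Nat → Nat → Int
  | 0, k => (k : Int)
  | f + 1, k =>
    if PySem.Int.mod ((10 : Int) ^ k) m ≠ 1 then leastDivisibleAltSearch m f (k + 1)
    else (k : Int)

def leastDivisible_alt (n : Int) : Int :=
  if PySem.Int.mod n 2 = 0 ∨ PySem.Int.mod n 5 = 0 then 0
  else leastDivisibleAltSearch (9 * |n|) (9 * n.natAbs + 9) 1

-- ===== PRECONDITION & SPEC =====
def Spec_leastDivisible (n : Int) (out : Int) : Prop := out = leastDivisible_alt n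
instance (n : Int) (out : Int) : Decidable (Spec_leastDivisible n out) := by unfold Spec_leastDivisible; infer_instance

-- ===== CLAIM (what is proved, stated in full; the proofs are below) =====
def Claim_equal_leastDivisible : Prop := ∀ (n : Int), Dom_leastDivisible n → Spec_leastDivisible n (leastDivisible n)

-- ===== LEMMAS AND PROOFS =====

-- the repunit with j ones
def repunit : Nat → Int
  | 0 => 0
  | j + 1 => 10 * repunit j + 1

lemma nine_mul_repunit (j : Nat) : 9 * repunit j = 10 ^ j - 1 := by
  induction j with
  | zero => simp [repunit]
  | succ j ih => simp [repunit, pow_succ]; ring_nf; ring_nf at ih; omega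

-- n | R(j) ↔ 9|n| | 10^j - 1
lemma dvd_repunit_iff (n : Int) (j : Nat) :
    n ∣ repunit j ↔ 9 * |n| ∣ 10 ^ j - 1 := by
  rw [← nine_mul_repunit]
  constructor
  · rintro ⟨c, hc⟩
    rcases abs_choice n with h | h
    · exact ⟨c, by rw [h]; rw [hc]; ring⟩
    · exact ⟨-c, by rw [h]; rw [hc]; ring⟩
  · rintro ⟨c, hc⟩
    rcases abs_choice n with h | h
    · rw [h] at hc
      exact (mul_dvd_mul_iff_left (by norm_num : (9:Int) ≠ 0)).mp ⟨c, by linarith [hc]⟩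
    · rw [h] at hc
      exact (mul_dvd_mul_iff_left (by norm_num : (9:Int) ≠ 0)).mp ⟨-c, by rw [hc]; ring⟩

lemma mod_congr (a b : Int) : PySem.Int.mod a b ≡ a [ZMOD b] := by
  have h := PySem.Int.floordiv_mul_add_mod a b
  exact Int.ModEq.symm (Int.modEq_iff_dvd.mpr ⟨-(PySem.Int.floordiv a b), by linarith [h]⟩)

lemma repunit_succ_eq (j : Nat) : repunit (j + 2) = repunit (j + 1) + 10 ^ (j + 1) := by
  have h1 := nine_mul_repunit (j + 1)
  have h2 : repunit (j + 2) = 10 * repunit (j + 1) + 1 := rfl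
  omega

-- the two stop conditions agree at every step
lemma cond_iff (n : Int) (hn : n ≠ 0) (j : Nat) (sum t : Int)
    (hsum : sum ≡ repunit (j + 1) [ZMOD n])
    (ht : t = (10 : Int) ^ (j + 1) % (9 * |n|)) :
    (PySem.Int.mod sum n = 0 ↔ t = 1) := by
  have hM : (0:Int) < 9 * |n| := by positivity
  have hM9 : (9:Int) ≤ 9 * |n| := by
    have : (1:Int) ≤ |n| := by
      rcases lt_or_gt_of_ne hn with h | h
      · rw [abs_of_neg h]; omega
      · rw [abs_of_pos h]; omega
    nlinarith
  rw [PySem.Int.mod_eq_zero_iff_dvd]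
  have h1m : (1:Int) % (9 * |n|) = 1 := Int.emod_eq_of_lt (by norm_num) (by omega)
  have h1 : n ∣ sum ↔ n ∣ repunit (j + 1) := by
    rw [← Int.modEq_zero_iff_dvd, ← Int.modEq_zero_iff_dvd]
    exact ⟨fun h => hsum.symm.trans h, fun h => hsum.trans h⟩
  rw [h1, dvd_repunit_iff]
  constructor
  · intro hd
    have : (10:Int) ^ (j+1) ≡ 1 [ZMOD 9 * |n|] := Int.modEq_iff_dvd.mpr (by
      obtain ⟨c, hc⟩ := hd; exact ⟨-c, by linarith⟩)
    unfold Int.ModEq at this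
    rw [ht, this, h1m]
  · intro h1t
    have : (10:Int) ^ (j+1) ≡ 1 [ZMOD 9 * |n|] := by
      unfold Int.ModEq
      rw [← ht, h1t, h1m]
    obtain ⟨c, hc⟩ := Int.modEq_iff_dvd.mp this
    exact ⟨-c, by linarith⟩

-- lockstep: A's accumulating loop and B's order search take the same branches and return the same k
lemma go_eq (n : Int) (hn : n ≠ 0) :
    ∀ (f j : Nat) (sum pow : Int),
      sum ≡ repunit (j + 1) [ZMOD n] →
      pow ≡ 10 ^ j [ZMOD n] →
      leastDivisibleGo n f sum pow ((j : Int) + 1) = leastDivisibleAltSearch (9 * |n|) f (j + 1) := by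
  intro f
  induction f with
  | zero => intro j sum pow _ _; simp [leastDivisibleGo, leastDivisibleAltSearch]
  | succ f ih =>
    intro j sum pow hsum hpow
    have hM : (0:Int) < 9 * |n| := by positivity
    have ht : PySem.Int.mod ((10 : Int) ^ (j + 1)) (9 * |n|) = (10 : Int) ^ (j + 1) % (9 * |n|) :=
      PySem.Int.mod_eq_emod_of_pos hM
    have hc := cond_iff n hn j sum (PySem.Int.mod ((10 : Int) ^ (j + 1)) (9 * |n|)) hsum ht
    simp only [leastDivisibleGo, leastDivisibleAltSearch]
    by_cases hstop : PySem.Int.mod sum n = 0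
    · rw [if_neg (by simpa using hstop), if_neg (by simpa using hc.mp hstop)]
      push_cast; ring
    · rw [if_pos hstop, if_pos (fun h => hstop (hc.mpr h))]
      have := ih (j + 1) (PySem.Int.mod (sum + PySem.Int.mod (pow * 10) n) n)
        (PySem.Int.mod (pow * 10) n)
        (by
          calc PySem.Int.mod (sum + PySem.Int.mod (pow * 10) n) n
              ≡ sum + PySem.Int.mod (pow * 10) n [ZMOD n] := mod_congr _ n
            _ ≡ repunit (j + 1) + pow * 10 [ZMOD n] := Int.ModEq.add hsum (mod_congr _ n)
            _ ≡ repunit (j + 1) + 10 ^ j * 10 [ZMOD n] := Int.ModEq.add_left _ (hpow.mul_right 10)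
            _ = repunit (j + 2) := by rw [repunit_succ_eq, pow_succ])
        (by
          calc PySem.Int.mod (pow * 10) n ≡ pow * 10 [ZMOD n] := mod_congr _ n
            _ ≡ 10 ^ j * 10 [ZMOD n] := hpow.mul_right 10
            _ = 10 ^ (j + 1) := (pow_succ 10 j).symm)
      have hk : ((j : Int) + 1) + 1 = ((j + 1 : Nat) : Int) + 1 := by push_cast; ring
      rw [hk]
      exact this

-- ===== VERDICT (by name: the statement is the Claim_ definition above) =====
theorem leastDivisible_spec : Claim_equal_leastDivisible := by
  intro n _
  unfold Spec_leastDivisible leastDivisible leastDivisible_alt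
  by_cases hg : PySem.Int.mod n 2 = 0 ∨ PySem.Int.mod n 5 = 0
  · rw [if_pos hg, if_pos hg]
  · rw [if_neg hg, if_neg hg]
    have hn : n ≠ 0 := by
      rintro rfl
      exact hg (Or.inl (by decide))
    have h := go_eq n hn (9 * n.natAbs + 9) 0 1 1 (by simp [repunit]) (by simp)
    simpa using h
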